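-- pv_equiv track=rewrite | github.com/RainbowDragon/ACSL | Python/Contest 3/2021 - 2022/FibonacciPascalJunior.py | printNumbers
-- ===== SOURCE A (Python) =====
-- def printNumbers(fib):
--
--     n = getFibonacciIndex(fib)
--     k = 0
--     current = 1
--     result = "1"
--
--     while k + 1 < n:
--         current = (current * (n - k) * (n - k - 1)) // (n * (k + 1))
--         n -= 1
--         k += 1
--         result += " " + str(current)
--
--     return result
--
-- def getFibonacciIndex(fib):
--
--     index = 1
--     first = 1
--     second = 1
--
--     while second < fib:
--         temp = first
--         first = second
--         second += temp
--         index += 1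
--
--     return index
-- ===== SOURCE B (Python) =====
-- import math
--
-- def getFibonacciIndex(fib):
--
--     index = 1
--     first = 1
--     second = 1
--
--     while second < fib:
--         temp = first
--         first = second
--         second += temp
--         index += 1
--
--     return index
--
-- def printNumbers(fib):
--     n = getFibonacciIndex(fib)
--     return " ".join(str(math.comb(n - j, j)) for j in range(n // 2 + 1))
-- ===== Notes on version B (the rewrite author's own statement) =====
-- stated objective: idiomatic
-- what changed: Replaces A's stateful while-loop with shifting n/k and an incremental floor-division recurrence by a direct closed-form join: each term is the binomial coefficient C(n-j, j), computed independently with math.comb for j from zero through half of n inclusive.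
import Mathlib
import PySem

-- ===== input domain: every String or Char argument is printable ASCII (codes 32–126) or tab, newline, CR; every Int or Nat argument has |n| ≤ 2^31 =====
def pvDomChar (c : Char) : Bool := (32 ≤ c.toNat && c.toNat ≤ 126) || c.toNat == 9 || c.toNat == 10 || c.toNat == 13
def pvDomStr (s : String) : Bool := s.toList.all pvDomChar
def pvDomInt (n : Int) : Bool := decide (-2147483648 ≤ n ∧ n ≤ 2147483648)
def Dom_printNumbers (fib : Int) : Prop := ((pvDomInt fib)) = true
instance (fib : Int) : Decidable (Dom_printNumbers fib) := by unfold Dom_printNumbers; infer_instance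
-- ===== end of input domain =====

-- B replaces A's incremental floor-division recurrence on a shifting (n, k) state by a direct
-- ' '.join of independently computed binomial coefficients C(n-j, j) (idiomatic; same cost).

-- ===== PORT A =====

-- shared helper: getFibonacciIndex (identical in A and in Source B); the 1 ≤ first / 1 ≤ second
-- hypotheses only justify termination (they hold at the single call site 1 1 1)
def getFibLoop (index first second fib : Int) (hf : 1 ≤ first) (hs : 1 ≤ second) : Int :=
  if _h : second < fib then
    getFibLoop (index + 1) second (second + first) fib hs (by omega)
  else
    index
termination_by (fib - second).toNat
decreasing_by omega

def getFibonacciIndex (fib : Int) : Int :=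
  getFibLoop 1 1 1 fib (by norm_num) (by norm_num)

-- A's while loop, state (n, k, current, result)
def pnLoop (n k current : Int) (result : String) : String :=
  if _h : k + 1 < n then
    let current' := PySem.Int.floordiv (current * (n - k) * (n - k - 1)) (n * (k + 1))
    pnLoop (n - 1) (k + 1) current' (result ++ " " ++ PySem.Int.toStr current')
  else
    result
termination_by (n - k).toNat
decreasing_by omega

def printNumbers (fib : Int) : String :=
  pnLoop (getFibonacciIndex fib) 0 1 "1"

-- ===== PORT B =====
-- math.comb(n-j, j) with 0 ≤ j ≤ n-j ported as Nat.choose (exact there)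
def printNumbers_alt (fib : Int) : String :=
  let n := getFibonacciIndex fib
  PySem.Str.join " "
    ((PySem.List.pyRange 0 (PySem.Int.floordiv n 2 + 1) 1).map
      (fun j => PySem.Int.toStr (((n - j).toNat.choose j.toNat : Int))))

-- ===== PRECONDITION & SPEC =====
def Spec_printNumbers (fib : Int) (out : String) : Prop := out = printNumbers_alt fib
instance (fib : Int) (out : String) : Decidable (Spec_printNumbers fib out) := by unfold Spec_printNumbers; infer_instance

-- ===== CLAIM (what is proved, stated in full; the proofs are below) =====
def Claim_equal_printNumbers : Prop := ∀ (fib : Int), Dom_printNumbers fib → Spec_printNumbers fib (printNumbers fib)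

-- ===== LEMMAS AND PROOFS =====

-- getFibonacciIndex is at least 1
theorem getFibLoop_ge (index first second fib : Int) (hf : 1 ≤ first) (hs : 1 ≤ second) :
    index ≤ getFibLoop index first second fib hf hs := by
  rw [getFibLoop]
  split
  · have := getFibLoop_ge (index + 1) second (second + first) fib hs (by omega)
    omega
  · omega
termination_by (fib - second).toNat
decreasing_by omega

theorem getFib_pos (fib : Int) : 1 ≤ getFibonacciIndex fib := getFibLoop_ge ..

-- the key binomial identity behind A's exact floor division
theorem key_choose (n k : Nat) (h : k + 1 < n) :
    n.choose k * (n - k) * (n - k - 1) = (n - 1).choose (k + 1) * (n * (k + 1)) := by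
  have h1 : n.choose (k + 1) * (k + 1) = n.choose k * (n - k) := Nat.choose_succ_right_eq n k
  have h2 : n.choose (k + 2) * (k + 2) = n.choose (k + 1) * (n - (k + 1)) :=
    Nat.choose_succ_right_eq n (k + 1)
  have h3 : (n - 1) + 1 = n := by omega
  have h4 : ((n - 1) + 1) * (n - 1).choose (k + 1) = ((n - 1) + 1).choose (k + 2) * (k + 2) :=
    Nat.add_one_mul_choose_eq (n - 1) (k + 1)
  rw [h3] at h4
  calc n.choose k * (n - k) * (n - k - 1)
      = n.choose (k + 1) * (k + 1) * (n - k - 1) := by rw [h1]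
    _ = n.choose (k + 1) * (n - (k + 1)) * (k + 1) := by
        have : n - k - 1 = n - (k + 1) := by omega
        rw [this]; ring
    _ = n.choose (k + 2) * (k + 2) * (k + 1) := by rw [h2]
    _ = n * (n - 1).choose (k + 1) * (k + 1) := by rw [← h4]
    _ = (n - 1).choose (k + 1) * (n * (k + 1)) := by ring

-- the list of characters A's loop still has to append, as closed-form binomials
def tailL (N j : Int) : List Char :=
  ((PySem.List.pyRange j (PySem.Int.floordiv N 2 + 1) 1).map
    (fun i => ' ' :: PySem.Int.toChars (((N - i).toNat.choose i.toNat : Int)))).flatten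

theorem floordiv_two_natCast (N : Nat) :
    PySem.Int.floordiv (N : Int) 2 = ((N / 2 : Nat) : Int) := by
  show Int.fdiv _ _ = _
  rw [Int.fdiv_eq_ediv]
  simp

-- one step of tailL, peeled at the front
theorem tailL_cons (N u : Nat) (hu : u ≤ N / 2) :
    tailL (N : Int) (u : Int)
      = (' ' :: PySem.Int.toChars ((N - u).choose u : Int)) ++ tailL (N : Int) ((u : Int) + 1) := by
  have hlt : (u : Int) < PySem.Int.floordiv (N : Int) 2 + 1 := by
    rw [floordiv_two_natCast]
    exact_mod_cast (by omega : (u : Int) < ((N / 2 : Nat) : Int) + 1)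
  unfold tailL
  rw [PySem.List.pyRange_one_cons hlt]
  have h1 : ((N : Int) - (u : Int)).toNat = N - u := by omega
  simp [h1]

theorem tailL_nil (N u : Nat) (hu : N / 2 < u) : tailL (N : Int) (u : Int) = [] := by
  unfold tailL
  rw [PySem.List.pyRange_one_eq_nil]
  · simp
  · rw [floordiv_two_natCast]
    exact_mod_cast (by omega : ((N / 2 : Nat) : Int) + 1 ≤ (u : Int))

-- loop invariant: from state (N - t, t, C(N-t, t), res) the loop appends exactly tailL N (t+1)
theorem pnLoop_eq (N : Nat) : ∀ (d t : Nat), d = N - 2 * t → ∀ (res : String),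
    (pnLoop ((N : Int) - t) t (((N - t).choose t : Int)) res).toList
      = res.toList ++ tailL N (t + 1) := by
  intro d
  induction d using Nat.strong_induction_on with
  | _ d ih =>
    intro t hd res
    rw [pnLoop]
    by_cases hc : (t : Int) + 1 < (N : Int) - t
    · have hN : 2 * t + 2 ≤ N := by exact_mod_cast (by omega : (2 * t + 2 : Int) ≤ (N : Int))
      rw [dif_pos hc]
      -- the floor division is exact and yields C(N-t-1, t+1) = C(N-(t+1), t+1)
      have c1 : (N : Int) - t - t = ((N - t - t : Nat) : Int) := by omega
      have c2 : (N : Int) - t - t - 1 = ((N - t - t - 1 : Nat) : Int) := by omega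
      have c3 : (N : Int) - t = ((N - t : Nat) : Int) := by omega
      have c4 : (t : Int) + 1 = ((t + 1 : Nat) : Int) := by omega
      have hnat : (N - t).choose t * (N - t - t) * (N - t - t - 1)
          = (N - (t + 1)).choose (t + 1) * ((N - t) * (t + 1)) := by
        have := key_choose (N - t) t (by omega)
        have e : N - t - 1 = N - (t + 1) := by omega
        rwa [e] at this
      have hcur : PySem.Int.floordiv
          (((N - t).choose t : Int) * (((N : Int) - t) - t) * (((N : Int) - t) - t - 1))
          (((N : Int) - t) * ((t : Int) + 1))
          = ((N - (t + 1)).choose (t + 1) : Int) := by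
        rw [c2, c1, c3, c4]
        have e1 : (((N - t).choose t : Int) * ((N - t - t : Nat) : Int) * ((N - t - t - 1 : Nat) : Int))
            = ((N - (t + 1)).choose (t + 1) : Int) * (((N - t : Nat) : Int) * ((t + 1 : Nat) : Int)) := by
          exact_mod_cast hnat
        rw [e1]
        show Int.fdiv _ _ = _
        refine Int.mul_fdiv_cancel _ (ne_of_gt ?_)
        exact_mod_cast Nat.mul_pos (by omega : 0 < N - t) (by omega : 0 < t + 1)
      rw [hcur]
      -- reshape the state for the induction hypothesis at t + 1
      have e2 : (N : Int) - t - 1 = (N : Int) - ((t + 1 : Nat) : Int) := by omega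
      rw [e2, c4, ih (N - 2 * (t + 1)) (by omega) (t + 1) rfl]
      have hstep := tailL_cons N (t + 1) (by omega)
      rw [hstep, show (((t + 1 : Nat) : Int) + 1) = (((t + 1) + 1 : Nat) : Int) by push_cast; ring]
      have hsp : (" " : String).toList = [' '] := rfl
      simp [String.toList_append, PySem.Int.toList_toStr, hsp, List.append_assoc]
    · rw [dif_neg hc]
      have hN : N ≤ 2 * t + 1 := by
        by_contra h
        exact hc (by omega)
      rw [show ((t : Int) + 1) = ((t + 1 : Nat) : Int) by omega, tailL_nil N (t + 1) (by omega)]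
      simp

-- B's join, peeled at its first element
theorem join_peel (sep : List Char) (x : List Char) (l : List (List Char)) :
    PySem.Chars.join sep (x :: l) = x ++ (l.map (fun y => sep ++ y)).flatten := by
  induction l generalizing x with
  | nil => simp [PySem.Chars.join_singleton]
  | cons y ys ih =>
    rw [PySem.Chars.join_cons_cons, ih y]
    simp

theorem alt_toList (fib : Int) :
    (printNumbers_alt fib).toList = '1' :: tailL ((getFibonacciIndex fib).toNat) 1 := by
  have hpos := getFib_pos fib
  set N : Nat := (getFibonacciIndex fib).toNat with hN
  have hfib : getFibonacciIndex fib = (N : Int) := by omega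
  simp only [printNumbers_alt]
  rw [hfib]
  have h01 : (0 : Int) < PySem.Int.floordiv (N : Int) 2 + 1 := by
    rw [floordiv_two_natCast]; positivity
  rw [PySem.List.pyRange_one_cons h01]
  simp only [List.map_cons]
  rw [PySem.Str.toList_join, List.map_cons, join_peel]
  have h0 : (((N : Int) - 0).toNat.choose (0 : Int).toNat : Int) = ((N.choose 0 : Nat) : Int) := by
    congr 1 <;> omega
  have hone : PySem.Int.toChars ((N.choose 0 : Nat) : Int) = ['1'] := by
    rw [Nat.choose_zero_right]; rfl
  rw [PySem.Int.toList_toStr, h0, hone]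
  unfold tailL
  rw [show (0 : Int) + 1 = ((1 : Nat) : Int) by norm_num]
  have hsp : (" " : String).toList = [' '] := rfl
  simp [List.map_map, Function.comp_def, PySem.Int.toList_toStr, hsp]

-- ===== VERDICT (by name: the statement is the Claim_ definition above) =====
theorem printNumbers_spec : Claim_equal_printNumbers := by
  intro fib _
  unfold Spec_printNumbers
  apply String.toList_inj.mp
  have hpos := getFib_pos fib
  set N : Nat := (getFibonacciIndex fib).toNat with hN
  have hfib : getFibonacciIndex fib = (N : Int) := by omega
  unfold printNumbers
  rw [hfib]
  have := pnLoop_eq N (N - 2 * 0) 0 rfl "1"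
  simp only [Nat.cast_zero, sub_zero, Nat.sub_zero, Nat.choose_zero_right, Nat.cast_one] at this
  rw [this, alt_toList]
  rfl
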